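-- pv_equiv track=rewrite | github.com/harsh-98/matchbox-puzzle-py | game.py | _calculate_score_from_record
-- ===== SOURCE A (Python) =====
-- def _calculate_score_from_record(arr_collision_record: list[int]):
--     score_total: int = 0
--     for i in arr_collision_record:
--         score, is_reset = _parse_single_collision_record(i)
--         if is_reset:
--             score_total = 0
--         else:
--             score_total += score
--     return score_total
--
-- def _parse_single_collision_record(record: int):
--     if record == 19:
--         return 10, 0
--     elif record == 23:
--         return 20, 0
--     elif record == 27:
--         return 0, 1
--     else:
--         return 0, 0
-- ===== SOURCE B (Python) =====
-- def _calculate_score_from_record(arr_collision_record: list[int]):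
--     # phase 1: locate the last reset record (27) by scanning the reversed list
--     rev = arr_collision_record[::-1]
--     k = None
--     for idx in range(len(rev)):
--         if rev[idx] == 27:
--             k = idx
--             break
--     # phase 2: sum the scores of the records strictly after the last reset
--     suffix = arr_collision_record if k is None else rev[:k][::-1]
--     total = 0
--     for r in suffix:
--         if r == 19:
--             total += 10
--         elif r == 23:
--             total += 20
--     return total
-- ===== Notes on version B (the rewrite author's own statement) =====
-- stated objective: alternative
-- what changed: Replaced A's single forward accumulate-with-reset pass by a two-phase strategy: first locate the last reset record (27) by scanning the reversed list, then sum 10/20 contributions over only the records strictly after it.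
import Mathlib
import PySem

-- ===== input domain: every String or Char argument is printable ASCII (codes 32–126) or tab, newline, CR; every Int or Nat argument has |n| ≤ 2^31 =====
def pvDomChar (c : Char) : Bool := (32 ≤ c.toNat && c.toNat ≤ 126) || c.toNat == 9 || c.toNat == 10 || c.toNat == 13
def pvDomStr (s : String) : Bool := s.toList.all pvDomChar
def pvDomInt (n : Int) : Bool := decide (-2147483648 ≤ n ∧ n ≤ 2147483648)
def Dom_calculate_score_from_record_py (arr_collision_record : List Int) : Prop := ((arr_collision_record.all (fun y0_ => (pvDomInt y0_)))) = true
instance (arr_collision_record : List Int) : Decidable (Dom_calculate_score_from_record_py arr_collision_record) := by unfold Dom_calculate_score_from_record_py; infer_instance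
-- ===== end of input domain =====

-- B replaces A's accumulate-with-reset pass by 'find the last reset, then sum the suffix after it' (alternative decomposition, same cost).

-- ===== PORT A =====
-- helper _parse_single_collision_record (returns (score, is_reset))
def parse_single_collision_record_py (record : Int) : Int × Int :=
  if record = 19 then (10, 0)
  else if record = 23 then (20, 0)
  else if record = 27 then (0, 1)
  else (0, 0)

def calculate_score_from_record_py (arr_collision_record : List Int) : Int :=
  arr_collision_record.foldl (fun score_total i =>
    let p := parse_single_collision_record_py i
    if p.2 ≠ 0 then 0 else score_total + p.1) 0

-- ===== PORT B =====
def calculate_score_from_record_py_alt (arr_collision_record : List Int) : Int :=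
  -- phase 1: locate the last reset (27) by scanning the reversed list (loop with break = first-index search)
  let rev := arr_collision_record.reverse
  let k := rev.findIdx? (fun v => v = 27)
  -- phase 2: sum scores over the records strictly after the last reset
  let suffix := match k with
    | none => arr_collision_record
    | some k => (rev.take k).reverse
  suffix.foldl (fun total r =>
    if r = 19 then total + 10 else if r = 23 then total + 20 else total) 0

-- ===== PRECONDITION & SPEC =====
def Spec_calculate_score_from_record_py (arr_collision_record : List Int) (out : Int) : Prop := out = calculate_score_from_record_py_alt arr_collision_record
instance (arr_collision_record : List Int) (out : Int) : Decidable (Spec_calculate_score_from_record_py arr_collision_record out) := by unfold Spec_calculate_score_from_record_py; infer_instance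

-- ===== CLAIM (what is proved, stated in full; the proofs are below) =====
def Claim_equal_calculate_score_from_record_py : Prop := ∀ (arr_collision_record : List Int), Dom_calculate_score_from_record_py arr_collision_record → Spec_calculate_score_from_record_py arr_collision_record (calculate_score_from_record_py arr_collision_record)

-- ===== LEMMAS AND PROOFS =====

-- score contribution of one non-reset record, and its sum over a list
def pvContrib (r : Int) : Int := if r = 19 then 10 else if r = 23 then 20 else 0

def pvSum (l : List Int) : Int := (l.map pvContrib).sum

-- the part of the list strictly after its last 27 (whole list if none)
def pvSuffix : List Int → List Int
  | [] => []
  | x :: xs => if 27 ∈ xs then pvSuffix xs else if x = 27 then xs else x :: xs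

theorem pvSuffix_of_not_mem (l : List Int) (h : 27 ∉ l) : pvSuffix l = l := by
  induction l with
  | nil => rfl
  | cons x xs ih =>
    simp only [List.mem_cons, not_or] at h
    have hx : ¬(x = 27) := fun e => h.1 e.symm
    simp [pvSuffix, h.2, hx]

theorem pvSuffix_append (a b : List Int) (hb : 27 ∉ b) : pvSuffix (a ++ 27 :: b) = b := by
  induction a with
  | nil => simp [pvSuffix, hb]
  | cons x xs ih => simp [pvSuffix, ih]

-- last-occurrence decomposition
theorem pvLastOcc (l : List Int) (h : 27 ∈ l) : ∃ a b, l = a ++ 27 :: b ∧ 27 ∉ b := by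
  induction l with
  | nil => cases h
  | cons x xs ih =>
    by_cases hx : 27 ∈ xs
    · obtain ⟨a, b, rfl, hb⟩ := ih hx
      exact ⟨x :: a, b, rfl, hb⟩
    · rcases List.mem_cons.mp h with h27 | h27
      · exact ⟨[], xs, by simp [h27.symm], hx⟩
      · exact absurd h27 hx

theorem foldA_eq (l : List Int) (acc : Int) :
    l.foldl (fun score_total i =>
      let p := parse_single_collision_record_py i
      if p.2 ≠ 0 then 0 else score_total + p.1) acc
    = (if 27 ∈ l then 0 else acc) + pvSum (pvSuffix l) := by
  induction l generalizing acc with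
  | nil => simp [pvSuffix, pvSum]
  | cons x xs ih =>
    simp only [List.foldl_cons, ih]
    by_cases hxs : 27 ∈ xs
    · simp [pvSuffix, hxs, List.mem_cons]
    · by_cases hx : x = 27
      · simp [pvSuffix, hxs, hx, parse_single_collision_record_py,
          pvSuffix_of_not_mem xs hxs]
      · have h27 : ¬(27 = x) := fun e => hx e.symm
        simp [pvSuffix, hxs, hx, h27, parse_single_collision_record_py, pvSum, pvContrib,
          pvSuffix_of_not_mem xs hxs]
        split_ifs <;> simp_all <;> ring

theorem foldB_eq (l : List Int) (acc : Int) :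
    l.foldl (fun total r =>
      if r = 19 then total + 10 else if r = 23 then total + 20 else total) acc
    = acc + pvSum l := by
  induction l generalizing acc with
  | nil => simp [pvSum]
  | cons x xs ih =>
    simp only [List.foldl_cons, ih, pvSum, List.map_cons, List.sum_cons, pvContrib]
    split_ifs <;> ring

theorem findIdx?_last (u v : List Int) (hu : 27 ∉ u) :
    (u ++ 27 :: v).findIdx? (fun r => r = 27) = some u.length := by
  induction u with
  | nil => simp [List.findIdx?_cons]
  | cons x xs ih =>
    simp only [List.mem_cons, not_or] at hu
    have h1 : ¬(x = 27) := fun e => hu.1 e.symm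
    simp [List.findIdx?_cons, h1, ih hu.2]

theorem altB_eq (l : List Int) :
    calculate_score_from_record_py_alt l = pvSum (pvSuffix l) := by
  by_cases h : 27 ∈ l
  · obtain ⟨a, b, rfl, hb⟩ := pvLastOcc l h
    have hrev : (a ++ 27 :: b).reverse = b.reverse ++ 27 :: a.reverse := by simp
    have hfind : (b.reverse ++ 27 :: a.reverse).findIdx? (fun r => r = 27)
        = some b.reverse.length := findIdx?_last _ _ (by simpa using hb)
    simp only [calculate_score_from_record_py_alt, hrev, hfind]
    rw [List.take_left, List.reverse_reverse, foldB_eq, pvSuffix_append a b hb]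
    ring
  · have hfind : l.reverse.findIdx? (fun r => r = 27) = none := by
      rw [List.findIdx?_eq_none_iff]
      intro x hx
      have hx27 : x ≠ 27 := fun e => h (e ▸ List.mem_reverse.mp hx)
      simp [hx27]
    simp only [calculate_score_from_record_py_alt, hfind]
    rw [foldB_eq, pvSuffix_of_not_mem l h]
    ring

-- ===== VERDICT (by name: the statement is the Claim_ definition above) =====
theorem calculate_score_from_record_py_spec : Claim_equal_calculate_score_from_record_py := by
  intro l _
  unfold Spec_calculate_score_from_record_py calculate_score_from_record_py
  rw [foldA_eq, altB_eq]
  split_ifs <;> ring
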